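-- pv_equiv track=rewrite | github.com/jdrae/algorithm | graph/depth first search/프_여행경로.py | solution
-- ===== SOURCE A (Python) =====
-- from queue import PriorityQueue
-- from collections import defaultdict
--
-- def solution(tickets):
--     answer = []
--     adj = defaultdict(PriorityQueue) # tip: 인접리스트
--     for [u, v] in tickets:
--         adj[u].put(v)
--
--     # dfs
--     stack = ["ICN"]
--     path = []
--     while stack:
--         curr = stack[-1]
--         if curr not in adj or adj[curr].qsize() == 0:
--             path.append(stack.pop())
--         else:
--             stack.append(adj[curr].get())
--     answer = path[::-1]
--     return answer
-- ===== SOURCE B (Python) =====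
-- def solution(tickets):
--     # Recursive Hierholzer: adjacency dict of ascending-sorted lists; visit pops
--     # the smallest destination first, appends a node after its tickets are used.
--     adj = {}
--     for u, v in tickets:
--         adj.setdefault(u, []).append(v)
--     for u in adj:
--         adj[u].sort()
--     path = []
--
--     def visit(node):
--         while adj.get(node):
--             visit(adj[node].pop(0))
--         path.append(node)
--
--     visit("ICN")
--     return path[::-1]
-- ===== Notes on version B (the rewrite author's own statement) =====
-- stated objective: alternative
-- what changed: Replaces the iterative explicit-stack DFS over per-node priority queues with a recursive Hierholzer visit over a dict of pre-sorted adjacency lists (sort once, pop the head), appending each node after its tickets are exhausted.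
import Mathlib
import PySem

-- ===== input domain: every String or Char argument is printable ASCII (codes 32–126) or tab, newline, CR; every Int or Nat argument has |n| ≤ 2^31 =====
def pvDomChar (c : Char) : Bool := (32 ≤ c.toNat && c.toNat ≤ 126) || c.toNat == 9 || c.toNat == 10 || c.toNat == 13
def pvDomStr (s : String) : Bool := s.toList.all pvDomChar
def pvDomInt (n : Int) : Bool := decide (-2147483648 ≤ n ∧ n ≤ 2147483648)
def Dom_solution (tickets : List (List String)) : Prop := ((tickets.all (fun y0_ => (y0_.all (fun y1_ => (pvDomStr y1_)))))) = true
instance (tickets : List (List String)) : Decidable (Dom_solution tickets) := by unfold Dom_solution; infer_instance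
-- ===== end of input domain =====

-- B replaces A's iterative explicit-stack DFS over per-node priority queues by a recursive
-- Hierholzer visit over pre-sorted adjacency lists; equal return value, a different decomposition.

-- ===== PORT A =====
-- queue.PriorityQueue over strings, modelled as an ascending sorted list:
-- put = ordered insert, get = pop the head (the minimum), qsize = length. Exact for string payloads.
def pqPut (q : List String) (v : String) : List String := List.orderedInsert (· ≤ ·) v q

-- adj[u].put(v) on the defaultdict, for one ticket (A's build step)
def aStep (d : PySem.Dict String (List String)) (t : List String) :
    PySem.Dict String (List String) :=
  match t with
  | [u, v] => d.modify u [] (fun q => pqPut q v)       -- non-2 tickets raise in Python: outside Pre_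
  | _ => d

-- the while-loop; fuel 2*|tickets|+1 is provably enough (each step pops a ticket or pops the stack)
def loopA : Nat → PySem.Dict String (List String) → List String → List String → List String
  | 0, _, _, path => path
  | f+1, adj, stack, path =>
    match stack with
    | [] => path
    | curr :: rest =>
      match adj.getD curr [] with           -- "curr not in adj or adj[curr].qsize() == 0"
      | [] => loopA f adj rest (path ++ [curr])          -- path.append(stack.pop())
      | c :: cs => loopA f (adj.insert curr cs) (c :: curr :: rest)  path  -- stack.append(adj[curr].get())

def solution (tickets : List (List String)) : List String :=
  let adj := tickets.foldl aStep PySem.Dict.empty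
  (loopA (2 * tickets.length + 1) adj ["ICN"] []).reverse  -- path[::-1]

-- ===== PORT B =====
-- adj.setdefault(u, []).append(v) for one ticket (B's build step)
def bStep (d : PySem.Dict String (List String)) (t : List String) :
    PySem.Dict String (List String) :=
  match t with
  | [u, v] => d.modify u [] (fun l => l ++ [v])        -- non-2 tickets raise in Python: outside Pre_
  | _ => d

-- "for u in adj: adj[u].sort()": each entry's list sorted in place, entry order kept
def sortEach (d : PySem.Dict String (List String)) : PySem.Dict String (List String) :=
  PySem.Dict.mk (d.items.map (fun kv => (kv.1, PySem.List.sorted kv.2 (fun x => x) false)))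

-- visit(node): while adj.get(node): visit(adj[node].pop(0)); path.append(node)
-- fuel |tickets|+1 is provably enough (every nested call removes a ticket first)
def visitB : Nat → PySem.Dict String (List String) → String → List String →
    PySem.Dict String (List String) × List String
  | 0, adj, _, path => (adj, path)
  | f+1, adj, node, path =>
    match adj.getD node [] with
    | [] => (adj, path ++ [node])
    | c :: cs =>
      let r := visitB f (adj.insert node cs) c path
      visitB f r.1 node r.2

def solution_alt (tickets : List (List String)) : List String :=
  let adj := sortEach (tickets.foldl bStep PySem.Dict.empty)
  (visitB (tickets.length + 1) adj "ICN" []).2.reverse   -- path[::-1]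

-- ===== PRECONDITION & SPEC =====
-- Pre_ excludes tickets that are not [src, dst] pairs: on those the Python `for [u, v] in tickets`
-- unpacking raises ValueError in both A and B.
def Pre_solution (tickets : List (List String)) : Prop := ∀ t ∈ tickets, t.length = 2
instance (tickets : List (List String)) : Decidable (Pre_solution tickets) := by
  unfold Pre_solution; infer_instance

def pvWitness_solution : List (List String) := [["ICN", "AAA"], ["AAA", "ICN"]]

def Spec_solution (tickets : List (List String)) (out : List String) : Prop := out = solution_alt tickets
instance (tickets : List (List String)) (out : List String) : Decidable (Spec_solution tickets out) := by unfold Spec_solution; infer_instance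

-- ===== CLAIM (what is proved, stated in full; the proofs are below) =====
def Claim_equal_solution : Prop := ∀ (tickets : List (List String)), Dom_solution tickets → Pre_solution tickets → Spec_solution tickets (solution tickets)

-- ===== LEMMAS AND PROOFS =====

-- total number of tickets left in an adjacency dict
def dsize (d : PySem.Dict String (List String)) : Nat :=
  (d.items.map (fun kv => kv.2.length)).sum

-- value-map over a dict (sortEach is mapVal of sorting)
def mapVal (g : List String → List String) (d : PySem.Dict String (List String)) :
    PySem.Dict String (List String) :=
  PySem.Dict.mk (d.items.map (fun kv => (kv.1, g kv.2)))

def sortFn (l : List String) : List String := PySem.List.sorted l (fun x => x) false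

lemma sortEach_eq_mapVal (d : PySem.Dict String (List String)) : sortEach d = mapVal sortFn d := rfl

lemma get?_mapVal (g : List String → List String) (d : PySem.Dict String (List String)) (k : String) :
    (mapVal g d).get? k = (d.get? k).map g := by
  obtain ⟨l⟩ := d
  induction l with
  | nil => rfl
  | cons p l ih =>
    show (PySem.Dict.mk ((p.1, g p.2) :: l.map _)).get? k = _
    rw [PySem.Dict.get?_mk_cons, PySem.Dict.get?_mk_cons]
    by_cases h : p.1 == k
    · simp [h]
    · simp only [h, Bool.false_eq_true, if_false]
      exact ih

lemma getD_mapVal (g : List String → List String) (hg : g [] = []) (d : PySem.Dict String (List String)) (k : String) :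
    (mapVal g d).getD k [] = g (d.getD k []) := by
  rw [PySem.Dict.getD_eq_get?_getD, PySem.Dict.getD_eq_get?_getD, get?_mapVal]
  cases h : d.get? k <;> simp [hg]

lemma contains_mapVal (g : List String → List String) (d : PySem.Dict String (List String)) (k : String) :
    (mapVal g d).contains k = d.contains k := by
  rw [PySem.Dict.contains_eq_isSome_get?, PySem.Dict.contains_eq_isSome_get?, get?_mapVal]
  cases d.get? k <;> simp

lemma keys_mapVal (g : List String → List String) (d : PySem.Dict String (List String)) :
    (mapVal g d).keys = d.keys := by
  obtain ⟨l⟩ := d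
  show (PySem.Dict.mk (l.map _)).keys = _
  simp [PySem.Dict.keys_mk, List.map_map, Function.comp_def]

lemma insert_mapVal (g : List String → List String) (d : PySem.Dict String (List String)) (k : String) (w : List String) :
    (mapVal g d).insert k (g w) = mapVal g (d.insert k w) := by
  have hitems : (mapVal g d).items = d.items.map (fun kv => (kv.1, g kv.2)) := rfl
  have hitems' : (mapVal g (d.insert k w)).items = (d.insert k w).items.map (fun kv => (kv.1, g kv.2)) := rfl
  apply PySem.Dict.ext
  rw [hitems', PySem.Dict.items_insert, PySem.Dict.items_insert, contains_mapVal, hitems]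
  by_cases h : d.contains k
  · simp only [h, if_true]
    show (d.items.map _).map _ = (d.items.map _).map _
    rw [List.map_map, List.map_map]
    refine List.map_congr_left (fun p _ => ?_)
    by_cases hp : p.1 = k <;> simp [hp]
  · simp only [h, Bool.false_eq_true, if_false]
    show d.items.map _ ++ _ = (d.items ++ [(k, w)]).map _
    simp

lemma orderedInsert_sorted (l : List String) (v : String) :
    pqPut (sortFn l) v = sortFn (l ++ [v]) := by
  have hp1 : List.Pairwise (fun a b : String => a ≤ b) (pqPut (sortFn l) v) := by
    apply List.Pairwise.orderedInsert
    simpa using PySem.List.sorted_pairwise l (fun x => x) 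
  have hp2 : List.Pairwise (fun a b : String => a ≤ b) (sortFn (l ++ [v])) := by
    simpa using PySem.List.sorted_pairwise (l ++ [v]) (fun x => x)
  have hperm : (pqPut (sortFn l) v).Perm (sortFn (l ++ [v])) :=
    (List.perm_orderedInsert _ v _).trans
      ((List.Perm.cons v (PySem.List.sorted_perm l (fun x => x) false)).trans
        ((List.perm_append_singleton v l).symm.trans
          (PySem.List.sorted_perm (l ++ [v]) (fun x => x) false).symm))
  exact hperm.eq_of_pairwise (fun a b _ _ h1 h2 => le_antisymm h1 h2) hp1 hp2

lemma dsize_mapVal (d : PySem.Dict String (List String)) :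
    dsize (mapVal sortFn d) = dsize d := by
  obtain ⟨l⟩ := d
  show ((l.map _).map _).sum = _
  rw [List.map_map]
  congr 1
  refine List.map_congr_left (fun p _ => ?_)
  simp [sortFn]

-- the two adjacency builds agree: A's ordered-insert build is B's append build with each list sorted
lemma build_eq (tickets : List (List String)) (d : PySem.Dict String (List String)) :
    tickets.foldl aStep (mapVal sortFn d)
    = mapVal sortFn (tickets.foldl bStep d) := by
  induction tickets generalizing d with
  | nil => rfl
  | cons t ts ih =>
    simp only [List.foldl_cons]
    match t with
    | [] => exact ih d
    | [_] => exact ih d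
    | u :: v :: _ :: _ => exact ih d
    | [u, v] =>
      have hmod : (mapVal sortFn d).modify u [] (fun q => pqPut q v)
          = mapVal sortFn (d.modify u [] (fun l => l ++ [v])) := by
        show (mapVal sortFn d).insert u (pqPut ((mapVal sortFn d).getD u []) v)
            = mapVal sortFn (d.insert u (d.getD u [] ++ [v]))
        rw [getD_mapVal sortFn rfl, orderedInsert_sorted, insert_mapVal]
      simp only [aStep, bStep]
      rw [hmod]
      exact ih (d.modify u [] (fun l => l ++ [v]))

lemma getD_eq_some (d : PySem.Dict String (List String)) (k : String) (c : String) (cs : List String)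
    (h : d.getD k [] = c :: cs) : d.get? k = some (c :: cs) := by
  rw [PySem.Dict.getD_eq_get?_getD] at h
  cases hg : d.get? k with
  | none => rw [hg] at h; simp at h
  | some w => rw [hg] at h; simp at h; rw [h]

lemma sum_replace : ∀ (l : List (String × List String)) (k : String) (w v : List String),
    (l.map Prod.fst).Nodup → (k, w) ∈ l →
    ((l.map (fun p => if p.1 == k then (k, v) else p)).map (fun p => p.2.length)).sum + w.length
      = (l.map (fun p => p.2.length)).sum + v.length := by
  intro l
  induction l with
  | nil => intro k w v _ hm; simp at hm
  | cons p l ih =>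
    intro k w v hnd hm
    simp only [List.map_cons, List.nodup_cons] at hnd
    simp only [beq_iff_eq]
    rcases List.mem_cons.mp hm with heq | hmem
    · have hk : p.1 = k := by rw [← heq]
      have hw : p.2 = w := by rw [← heq]
      have htail : l.map (fun q => if q.1 = k then (k, v) else q) = l := by
        conv_rhs => rw [← List.map_id l]
        refine List.map_congr_left (fun q hq => ?_)
        have hq1 : q.1 ≠ k := fun hqk => hnd.1 (hk ▸ hqk ▸ List.mem_map_of_mem hq)
        simp [hq1]
      simp only [List.map_cons, List.sum_cons, hk, htail, if_pos]
      rw [← hw]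
      omega
    · have hkl : k ∈ l.map Prod.fst := List.mem_map_of_mem hmem
      have hk : p.1 ≠ k := fun h => hnd.1 (h ▸ hkl)
      have := ih k w v hnd.2 hmem
      simp only [beq_iff_eq] at this
      simp only [List.map_cons, List.sum_cons, hk, if_false]
      omega

lemma dsize_insert_eq (d : PySem.Dict String (List String)) (k : String) (w v : List String)
    (hnd : d.keys.Nodup) (h : d.get? k = some w) :
    dsize (d.insert k v) + w.length = dsize d + v.length := by
  have hc : d.contains k = true := by
    rw [PySem.Dict.contains_eq_isSome_get?, h]; rfl
  have hm : (k, w) ∈ d.items := PySem.Dict.mem_items_of_get?_eq_some d h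
  show ((d.insert k v).items.map (fun p => p.2.length)).sum + _ = _
  rw [PySem.Dict.items_insert, if_pos hc]
  exact sum_replace d.items k w v hnd hm

lemma dsize_insert_new (d : PySem.Dict String (List String)) (k : String) (v : List String)
    (hc : d.contains k = false) : dsize (d.insert k v) = dsize d + v.length := by
  show ((d.insert k v).items.map (fun p => p.2.length)).sum = _
  rw [PySem.Dict.items_insert, hc]
  simp [dsize]

lemma dsize_insert_pop (d : PySem.Dict String (List String)) (k : String) (c : String) (cs : List String)
    (hnd : d.keys.Nodup) (h : d.getD k [] = c :: cs) :
    dsize (d.insert k cs) + 1 = dsize d := by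
  have hg := getD_eq_some d k c cs h
  have := dsize_insert_eq d k (c :: cs) cs hnd hg
  simp only [List.length_cons] at this
  omega

-- raw build: keys stay unique, size bounded by the number of tickets
lemma build_nodup (tickets : List (List String)) (d : PySem.Dict String (List String))
    (hnd : d.keys.Nodup) :
    (tickets.foldl bStep d).keys.Nodup := by
  induction tickets generalizing d with
  | nil => exact hnd
  | cons t ts ih =>
    simp only [List.foldl_cons]
    match t with
    | [] => exact ih d hnd
    | [_] => exact ih d hnd
    | u :: v :: _ :: _ => exact ih d hnd
    | [u, v] => exact ih _ (PySem.Dict.nodup_keys_insert _ _ _ hnd)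

lemma build_dsize (tickets : List (List String)) (d : PySem.Dict String (List String))
    (hnd : d.keys.Nodup) :
    dsize (tickets.foldl bStep d) ≤ dsize d + tickets.length := by
  induction tickets generalizing d with
  | nil => simp
  | cons t ts ih =>
    simp only [List.foldl_cons, List.length_cons]
    match t with
    | [] => exact le_trans (ih d hnd) (by omega)
    | [_] => exact le_trans (ih d hnd) (by omega)
    | u :: v :: _ :: _ => exact le_trans (ih d hnd) (by omega)
    | [u, v] =>
      have hstep : dsize (d.modify u [] (fun l => l ++ [v])) = dsize d + 1 := by
        show dsize (d.insert u (d.getD u [] ++ [v])) = dsize d + 1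
        by_cases hc : d.contains u = true
        · obtain ⟨w, hw⟩ : ∃ w, d.get? u = some w := by
            rw [PySem.Dict.contains_eq_isSome_get?] at hc
            exact Option.isSome_iff_exists.mp hc
          have hgd : d.getD u [] = w := PySem.Dict.getD_of_get?_eq_some d [] hw
          have := dsize_insert_eq d u w (w ++ [v]) hnd hw
          rw [hgd]
          simp only [List.length_append, List.length_cons, List.length_nil] at this ⊢
          omega
        · have hc' : d.contains u = false := by simpa using hc
          rw [PySem.Dict.getD_of_not_contains d [] hc', dsize_insert_new d u _ hc']
          simp
      have hnd' : (d.modify u [] (fun l => l ++ [v])).keys.Nodup :=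
        PySem.Dict.nodup_keys_insert _ _ _ hnd
      exact le_trans (ih _ hnd') (by simp only [bStep]; rw [hstep]; omega)

-- visitB: keys stay unique and tickets only disappear
lemma visitB_nodup_size : ∀ (f : Nat) (adj : PySem.Dict String (List String)) (node : String) (path : List String),
    adj.keys.Nodup →
    (visitB f adj node path).1.keys.Nodup ∧ dsize (visitB f adj node path).1 ≤ dsize adj := by
  intro f
  induction f with
  | zero => intro adj node path hnd; exact ⟨hnd, le_refl _⟩
  | succ f ih =>
    intro adj node path hnd
    cases h : adj.getD node [] with
    | nil => simp only [visitB, h]; exact ⟨hnd, le_refl _⟩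
    | cons c cs =>
      simp only [visitB, h]
      have hnd' := PySem.Dict.nodup_keys_insert adj node cs hnd
      have hsz : dsize (adj.insert node cs) + 1 = dsize adj := dsize_insert_pop adj node c cs hnd h
      obtain ⟨h1, h2⟩ := ih (adj.insert node cs) c path hnd'
      obtain ⟨h3, h4⟩ := ih (visitB f (adj.insert node cs) c path).1 node
        (visitB f (adj.insert node cs) c path).2 h1
      exact ⟨h3, by omega⟩

-- fuel irrelevance
lemma visitB_fuel : ∀ (f g : Nat) (adj : PySem.Dict String (List String)) (node : String) (path : List String),
    adj.keys.Nodup → dsize adj + 1 ≤ f → dsize adj + 1 ≤ g →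
    visitB f adj node path = visitB g adj node path := by
  intro f
  induction f with
  | zero => intro g adj node path hnd hf hg; omega
  | succ f ih =>
    intro g adj node path hnd hf hg
    cases g with
    | zero => omega
    | succ g =>
      cases h : adj.getD node [] with
      | nil => simp only [visitB, h]
      | cons c cs =>
        simp only [visitB, h]
        have hnd' := PySem.Dict.nodup_keys_insert adj node cs hnd
        have hsz : dsize (adj.insert node cs) + 1 = dsize adj := dsize_insert_pop adj node c cs hnd h
        have e1 : visitB f (adj.insert node cs) c path = visitB g (adj.insert node cs) c path :=
          ih g _ c path hnd' (by omega) (by omega)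
        rw [e1]
        obtain ⟨hn1, hs1⟩ := visitB_nodup_size g (adj.insert node cs) c path hnd'
        exact ih g _ node _ hn1 (by omega) (by omega)

lemma loopA_nil (f : Nat) (adj : PySem.Dict String (List String)) (path : List String) :
    loopA f adj [] path = path := by
  cases f <;> rfl

lemma loopA_fuel : ∀ (f g : Nat) (adj : PySem.Dict String (List String)) (stack path : List String),
    adj.keys.Nodup → 2 * dsize adj + stack.length ≤ f → 2 * dsize adj + stack.length ≤ g →
    loopA f adj stack path = loopA g adj stack path := by
  intro f
  induction f with
  | zero => intro g adj stack path hnd hf hg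
            cases stack with
            | nil => rw [loopA_nil, loopA_nil]
            | cons curr rest => simp at hf
  | succ f ih =>
    intro g adj stack path hnd hf hg
    cases stack with
    | nil => rw [loopA_nil, loopA_nil]
    | cons curr rest =>
      cases g with
      | zero => simp at hg
      | succ g =>
        cases h : adj.getD curr [] with
        | nil =>
          simp only [loopA, h]
          exact ih g adj rest (path ++ [curr]) hnd (by simp at hf ⊢; omega) (by simp at hg ⊢; omega)
        | cons c cs =>
          simp only [loopA, h]
          have hnd' := PySem.Dict.nodup_keys_insert adj curr cs hnd
          have hsz : dsize (adj.insert curr cs) + 1 = dsize adj := dsize_insert_pop adj curr c cs hnd h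
          exact ih g _ (c :: curr :: rest) path hnd' (by simp at hf ⊢; omega) (by simp at hg ⊢; omega)

-- MAIN: the stack loop simulates one full recursive visit of the stack's top
lemma main_sim : ∀ (n : Nat) (adj : PySem.Dict String (List String)), dsize adj ≤ n → adj.keys.Nodup →
    ∀ (node : String) (rest path : List String) (f : Nat), 2 * dsize adj + 1 + rest.length ≤ f →
    loopA f adj (node :: rest) path
      = loopA f (visitB (dsize adj + 1) adj node path).1 rest (visitB (dsize adj + 1) adj node path).2 := by
  intro n
  induction n using Nat.strong_induction_on with
  | _ n ih =>
    intro adj hle hnd node rest path f hf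
    obtain ⟨f, rfl⟩ : ∃ f', f = f' + 1 := ⟨f - 1, by omega⟩
    cases h : adj.getD node [] with
    | nil =>
      have hv : visitB (dsize adj + 1) adj node path = (adj, path ++ [node]) := by
        simp only [visitB, h]
      rw [hv]
      simp only [loopA, h]
      exact loopA_fuel f (f + 1) adj rest (path ++ [node]) hnd (by omega) (by omega)
    | cons c cs =>
      have hnd' := PySem.Dict.nodup_keys_insert adj node cs hnd
      have hsz : dsize (adj.insert node cs) + 1 = dsize adj := dsize_insert_pop adj node c cs hnd h
      obtain ⟨hn1, hs1⟩ := visitB_nodup_size (dsize (adj.insert node cs) + 1)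
        (adj.insert node cs) c path hnd'
      have e1 := ih (dsize (adj.insert node cs)) (by omega) (adj.insert node cs) (le_refl _)
        hnd' c (node :: rest) path (f) (by simp only [List.length_cons]; omega)
      have e2 := ih (dsize (adj.insert node cs)) (by omega)
        (visitB (dsize (adj.insert node cs) + 1) (adj.insert node cs) c path).1 hs1 hn1 node rest
        (visitB (dsize (adj.insert node cs) + 1) (adj.insert node cs) c path).2 f
        (by omega)
      have hv : visitB (dsize adj + 1) adj node path
          = visitB (dsize adj) (visitB (dsize adj) (adj.insert node cs) c path).1 node
              (visitB (dsize adj) (adj.insert node cs) c path).2 := by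
        simp only [visitB, h]
      have hv1 : visitB (dsize adj) (adj.insert node cs) c path
          = visitB (dsize (adj.insert node cs) + 1) (adj.insert node cs) c path :=
        visitB_fuel _ _ _ _ _ hnd' (by omega) (by omega)
      have hv2 : visitB (dsize adj)
            (visitB (dsize (adj.insert node cs) + 1) (adj.insert node cs) c path).1 node
            (visitB (dsize (adj.insert node cs) + 1) (adj.insert node cs) c path).2
          = visitB (dsize (visitB (dsize (adj.insert node cs) + 1) (adj.insert node cs) c path).1 + 1)
            (visitB (dsize (adj.insert node cs) + 1) (adj.insert node cs) c path).1 node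
            (visitB (dsize (adj.insert node cs) + 1) (adj.insert node cs) c path).2 :=
        visitB_fuel _ _ _ _ _ hn1 (by omega) (by omega)
      obtain ⟨hn2, hs2⟩ := visitB_nodup_size
        (dsize (visitB (dsize (adj.insert node cs) + 1) (adj.insert node cs) c path).1 + 1)
        (visitB (dsize (adj.insert node cs) + 1) (adj.insert node cs) c path).1 node
        (visitB (dsize (adj.insert node cs) + 1) (adj.insert node cs) c path).2 hn1
      rw [hv, hv1, hv2]
      simp only [loopA, h]
      rw [e1, e2]
      exact loopA_fuel f (f + 1) _ rest _ hn2 (by omega) (by omega)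

-- ===== VERDICT (by name: the statement is the Claim_ definition above) =====
theorem solution_spec : Claim_equal_solution := by
  intro tickets _ _
  unfold Spec_solution solution solution_alt
  simp only []
  have hnd0 : (PySem.Dict.empty : PySem.Dict String (List String)).keys.Nodup := by
    simp [PySem.Dict.keys_empty]
  have hb := build_eq tickets (PySem.Dict.empty : PySem.Dict String (List String))
  have hndraw : (tickets.foldl bStep PySem.Dict.empty).keys.Nodup := build_nodup tickets _ hnd0
  have hsraw : dsize (tickets.foldl bStep PySem.Dict.empty) ≤ tickets.length := by
    have h := build_dsize tickets PySem.Dict.empty hnd0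
    rwa [show dsize (PySem.Dict.empty : PySem.Dict String (List String)) = 0 from rfl,
      Nat.zero_add] at h
  rw [show (mapVal sortFn PySem.Dict.empty : PySem.Dict String (List String)) = PySem.Dict.empty from rfl] at hb
  rw [hb, show (mapVal sortFn (tickets.foldl bStep PySem.Dict.empty)) = sortEach (tickets.foldl bStep PySem.Dict.empty) from rfl]
  set adjB := sortEach (tickets.foldl bStep PySem.Dict.empty) with hadjB
  have hndB : adjB.keys.Nodup := by
    rw [hadjB, sortEach_eq_mapVal, keys_mapVal]; exact hndraw
  have hsB : dsize adjB ≤ tickets.length := by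
    rw [hadjB, sortEach_eq_mapVal, dsize_mapVal]; exact hsraw
  have hmain := main_sim (dsize adjB) adjB (le_refl _) hndB "ICN" [] [] (2 * tickets.length + 1)
    (by simp only [List.length_nil]; omega)
  rw [hmain, loopA_nil]
  rw [visitB_fuel (dsize adjB + 1) (tickets.length + 1) adjB "ICN" [] hndB (le_refl _) (by omega)]
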